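-- pv_equiv track=rewrite | github.com/iamnshrd/mentions | agents/mentions/providers/kalshi/sourcing.py | _normalized_label_tokens
-- ===== SOURCE A (Python) =====
-- def _normalized_label_tokens(market: dict) -> set[str]:
--     raw = ' '.join([
--         market.get('ticker', '') or '',
--         market.get('subtitle', '') or '',
--         market.get('yes_sub_title', '') or '',
--         market.get('no_sub_title', '') or '',
--     ]).lower()
--
--     cleaned = []
--     token = []
--     for ch in raw:
--         if ch.isalnum():
--             token.append(ch)
--         else:
--             if token:
--                 cleaned.append(''.join(token))
--                 token = []
--     if token:
--         cleaned.append(''.join(token))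
--     return set(cleaned)
-- ===== SOURCE B (Python) =====
-- def _normalized_label_tokens(market: dict) -> set[str]:
--     raw = ' '.join([
--         market.get('ticker', '') or '',
--         market.get('subtitle', '') or '',
--         market.get('yes_sub_title', '') or '',
--         market.get('no_sub_title', '') or '',
--     ]).lower()
--     # stage 1: normalize every non-alphanumeric character to a space
--     # stage 2: let str.split() cut the string on whitespace runs
--     normalized = ''.join(ch if ch.isalnum() else ' ' for ch in raw)
--     return set(normalized.split())
-- ===== Notes on version B (the rewrite author's own statement) =====
-- stated objective: idiomatic
-- what changed: A's manual accumulate/flush state machine is replaced by two stateless passes: map every non-alphanumeric character to a space, then let str.split() extract the tokens.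
import Mathlib
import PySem

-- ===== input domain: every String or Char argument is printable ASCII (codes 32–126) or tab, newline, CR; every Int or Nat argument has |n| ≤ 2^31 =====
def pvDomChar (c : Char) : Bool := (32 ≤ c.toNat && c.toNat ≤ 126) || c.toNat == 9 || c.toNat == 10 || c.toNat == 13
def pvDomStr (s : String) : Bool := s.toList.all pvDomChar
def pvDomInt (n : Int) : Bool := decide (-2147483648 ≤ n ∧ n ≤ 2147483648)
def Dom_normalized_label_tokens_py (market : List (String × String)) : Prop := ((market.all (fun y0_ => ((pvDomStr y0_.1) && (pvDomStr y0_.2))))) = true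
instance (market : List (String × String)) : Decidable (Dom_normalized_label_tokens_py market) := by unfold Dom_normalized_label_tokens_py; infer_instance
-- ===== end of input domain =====

-- B replaces A's accumulate/flush state machine by two stateless passes (map non-alnum to space, then str.split()); idiomatic, return value only.

-- ===== PORT A =====
-- shared by both ports: the identical Python preamble
-- raw = ' '.join([market.get(k,'') or '' for each of the four keys]).lower()
-- ('x or ""' is the identity on strings: a falsy string is already ''), as a char list
def pvRaw (market : List (String × String)) : List Char :=
  (PySem.Str.lower (PySem.Str.join " "
    [PySem.Dict.getD (PySem.Dict.mk market) "ticker" "",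
     PySem.Dict.getD (PySem.Dict.mk market) "subtitle" "",
     PySem.Dict.getD (PySem.Dict.mk market) "yes_sub_title" "",
     PySem.Dict.getD (PySem.Dict.mk market) "no_sub_title" ""])).toList

-- A's loop: state (cleaned, token); ''.join(token) = String.mk token
def pvLoopA : List Char → List String → List Char → List String
  | [], cleaned, token => if token ≠ [] then cleaned ++ [String.mk token] else cleaned
  | c :: cs, cleaned, token =>
      if PySem.Chars.isalnum c then pvLoopA cs cleaned (token ++ [c])
      else if token ≠ [] then pvLoopA cs (cleaned ++ [String.mk token]) []
      else pvLoopA cs cleaned token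

def normalized_label_tokens_py (market : List (String × String)) : List String :=
  PySem.Set.ofList (pvLoopA (pvRaw market) [] [])

-- ===== PORT B =====
-- stage 1: ''.join(ch if ch.isalnum() else ' ' for ch in raw)
def pvNormalize (cs : List Char) : List Char :=
  cs.map (fun ch => if PySem.Chars.isalnum ch then ch else ' ')

-- stage 2: set(normalized.split())
def normalized_label_tokens_py_alt (market : List (String × String)) : List String :=
  PySem.Set.ofList (PySem.Str.split₀ (String.mk (pvNormalize (pvRaw market))))

-- ===== PRECONDITION & SPEC =====
def Spec_normalized_label_tokens_py (market : List (String × String)) (out : List String) : Prop := out = normalized_label_tokens_py_alt market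
instance (market : List (String × String)) (out : List String) : Decidable (Spec_normalized_label_tokens_py market out) := by unfold Spec_normalized_label_tokens_py; infer_instance

-- ===== CLAIM (what is proved, stated in full; the proofs are below) =====
def Claim_equal_normalized_label_tokens_py : Prop := ∀ (market : List (String × String)), Dom_normalized_label_tokens_py market → Spec_normalized_label_tokens_py market (normalized_label_tokens_py market)

-- ===== LEMMAS AND PROOFS =====

theorem char_le_toNat (c d : Char) : c ≤ d ↔ c.toNat ≤ d.toNat := Iff.rfl

-- an alphanumeric character is never whitespace
theorem isalnum_not_isspace (c : Char) (h : PySem.Chars.isalnum c = true) :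
    PySem.Chars.isspace c = false := by
  have hA : ('A':Char).toNat = 65 := rfl
  have hZ : ('Z':Char).toNat = 90 := rfl
  have ha : ('a':Char).toNat = 97 := rfl
  have hz : ('z':Char).toNat = 122 := rfl
  have h0 : ('0':Char).toNat = 48 := rfl
  have h9 : ('9':Char).toNat = 57 := rfl
  simp only [PySem.Chars.isalnum, PySem.Chars.isalpha, PySem.Chars.isdigit,
    PySem.Chars.isupper, PySem.Chars.islower,
    Bool.or_eq_true, Bool.and_eq_true, decide_eq_true_eq, char_le_toNat,
    hA, hZ, ha, hz, h0, h9] at h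
  simp only [PySem.Chars.isspace,
    Bool.or_eq_false_iff, Bool.and_eq_false_iff, decide_eq_false_iff_not, not_le]
  omega

theorem isspace_space : PySem.Chars.isspace ' ' = true := by decide

-- split₀.go's accumulator is a reversed prefix of the result
theorem split₀_go_acc (s : List Char) : ∀ cur acc,
    PySem.Chars.split₀.go s cur acc = acc.reverse ++ PySem.Chars.split₀.go s cur [] := by
  induction s with
  | nil =>
      intro cur acc
      by_cases h : cur.isEmpty
      · simp [PySem.Chars.split₀.go, h]
      · simp [PySem.Chars.split₀.go, h]
  | cons c rest ih =>
      intro cur acc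
      by_cases hs : PySem.Chars.isspace c = true
      · by_cases h : cur.isEmpty
        · simp only [PySem.Chars.split₀.go, hs, h, if_true]
          exact ih [] acc
        · simp only [PySem.Chars.split₀.go, hs, h, if_true, if_false]
          rw [ih [] (cur.reverse :: acc), ih [] [cur.reverse]]
          simp
      · simp only [PySem.Chars.split₀.go, hs, if_false]
        exact ih (c :: cur) acc

-- A's loop on cs equals split₀.go on the normalized cs, with states related by
-- cur = token.reverse and cleaned prepended
theorem pvLoopA_eq_split (cs : List Char) : ∀ cleaned token,
    pvLoopA cs cleaned token =
      cleaned ++ (PySem.Chars.split₀.go (pvNormalize cs) token.reverse []).map String.ofList := by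
  induction cs with
  | nil =>
      intro cleaned token
      cases token with
      | nil => simp [pvLoopA, pvNormalize, PySem.Chars.split₀.go]
      | cons t ts =>
          simp [pvLoopA, pvNormalize, PySem.Chars.split₀.go, String.mk, String.ofList]
  | cons c cs ih =>
      intro cleaned token
      by_cases h : PySem.Chars.isalnum c = true
      · rw [pvLoopA, if_pos h]
        simp only [pvNormalize, List.map_cons, h, if_true]
        rw [PySem.Chars.split₀.go, if_neg (by simp [isalnum_not_isspace c h])]
        rw [ih cleaned (token ++ [c])]
        simp [pvNormalize]
      · rw [pvLoopA, if_neg h]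
        have h' : PySem.Chars.isalnum c = false := by simpa using h
        simp only [pvNormalize, List.map_cons, h', Bool.false_eq_true, if_false]
        rw [PySem.Chars.split₀.go, if_pos isspace_space]
        cases token with
        | nil =>
            rw [if_neg (fun hh => hh rfl)]
            simp only [List.reverse_nil, List.isEmpty_nil, if_true]
            exact ih cleaned []
        | cons t ts =>
            rw [if_pos (by simp)]
            have : (t :: ts).reverse.isEmpty = false := by simp
            rw [this]
            simp only [Bool.false_eq_true, if_false]
            rw [List.reverse_reverse, split₀_go_acc]
            rw [show (List.map (fun ch => if PySem.Chars.isalnum ch = true then ch else ' ') cs) = pvNormalize cs from rfl]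
            rw [ih (cleaned ++ [String.mk (t :: ts)]) []]
            simp
            rfl

-- ===== VERDICT (by name: the statement is the Claim_ definition above) =====
theorem normalized_label_tokens_py_spec : Claim_equal_normalized_label_tokens_py := by
  intro market _
  show PySem.Set.ofList (pvLoopA (pvRaw market) [] []) =
    PySem.Set.ofList (PySem.Str.split₀ (String.mk (pvNormalize (pvRaw market))))
  rw [pvLoopA_eq_split (pvRaw market) [] []]
  rw [show String.mk (pvNormalize (pvRaw market)) = String.ofList (pvNormalize (pvRaw market)) from rfl]
  simp [PySem.Str.split₀, PySem.Chars.split₀, String.toList_ofList]
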